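-- pv_equiv track=rewrite | github.com/Computamos/Guias-TDA | guia1/codigo.py | izquierdaDominante_bruto
-- ===== SOURCE A (Python) =====
-- def izquierdaDominante_bruto(i, j, arr):
--     if i == j:
--         return True
--
--     medio = (i + j) // 2
--
--     suma_izq = sum(arr[i:medio+1])
--     suma_der = sum(arr[medio+1:j+1])
--
--     if suma_izq < suma_der:
--         return False
--
--     return izquierdaDominante_bruto(i, medio, arr) and \
--            izquierdaDominante_bruto(medio+1, j, arr)
-- ===== SOURCE B (Python) =====
-- def izquierdaDominante_bruto(i, j, arr):
--     pref = [0]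
--     s = 0
--     for x in arr:
--         s += x
--         pref.append(s)
--
--     def seg(a, b):
--         lo, hi, _ = slice(a, b).indices(len(arr))
--         return pref[hi] - pref[lo] if lo < hi else 0
--
--     stack = [(i, j)]
--     while stack:
--         a, b = stack.pop()
--         if a == b:
--             continue
--         m = (a + b) // 2
--         if seg(a, m + 1) < seg(m + 1, b + 1):
--             return False
--         stack.append((m + 1, b))
--         stack.append((a, m))
--     return True
-- ===== Notes on version B (the rewrite author's own statement) =====
-- stated objective: alternative
-- what changed: B replaces A's divide-and-conquer recursion by an explicit work-stack iteration over the split intervals and computes every half-range sum as a subtraction of two entries of a prefix-sum table built once (slice bounds normalized with the standard-library slice().indices()), instead of re-slicing and re-summing the array at every split; Pre_ excludes i > j, on which A recurses forever and raises RecursionError.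
import Mathlib
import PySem

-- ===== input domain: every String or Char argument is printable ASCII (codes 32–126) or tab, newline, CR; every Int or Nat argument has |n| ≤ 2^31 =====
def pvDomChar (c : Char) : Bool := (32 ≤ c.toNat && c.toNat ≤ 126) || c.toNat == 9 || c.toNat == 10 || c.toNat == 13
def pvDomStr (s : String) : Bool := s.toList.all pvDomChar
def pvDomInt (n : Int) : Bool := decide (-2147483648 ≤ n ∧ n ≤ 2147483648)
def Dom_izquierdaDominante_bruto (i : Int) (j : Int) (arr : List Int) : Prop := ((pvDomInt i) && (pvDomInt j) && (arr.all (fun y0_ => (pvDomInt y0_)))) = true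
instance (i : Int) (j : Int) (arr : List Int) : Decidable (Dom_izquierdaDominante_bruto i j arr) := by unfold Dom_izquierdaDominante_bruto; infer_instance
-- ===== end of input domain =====

-- B replaces A's divide-and-conquer recursion by an explicit work-stack over the split
-- intervals, with each half-range sum read off a prefix-sum table built once
-- (objective: alternative; equal return values on i ≤ j).


-- ===== PORT A =====
-- A's recursion made total with fuel = (j-i)+1 recursion levels; j-i strictly shrinks
-- at each split, so the fuel-out branch is unreachable when i ≤ j.
def pvOkA (arr : List Int) : Nat → Int → Int → Bool
  | 0, _, _ => true
  | fuel + 1, i, j =>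
    if i == j then true
    else
      let medio := PySem.Int.floordiv (i + j) 2
      let suma_izq := (PySem.List.slice arr (some i) (some (medio + 1))).sum
      let suma_der := (PySem.List.slice arr (some (medio + 1)) (some (j + 1))).sum
      if suma_izq < suma_der then false
      else pvOkA arr fuel i medio && pvOkA arr fuel (medio + 1) j

def izquierdaDominante_bruto (i : Int) (j : Int) (arr : List Int) : Bool :=
  pvOkA arr ((j - i).toNat + 1) i j

-- ===== PORT B =====
-- Source B's pref-building loop with running sum s: pvPrefAux s xs = [s, s+x0, s+x0+x1, …]
def pvPrefAux (s : Int) : List Int → List Int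
  | [] => [s]
  | x :: xs => s :: pvPrefAux (s + x) xs

-- Source B's seg: slice(a,b).indices(n) normalizes a slice bound exactly as
-- PySem.List.clampIdx does; then a difference of two prefix-sum entries.
def pvSeg (pref : List Int) (n : Nat) (a b : Int) : Int :=
  let lo := PySem.List.clampIdx n a
  let hi := PySem.List.clampIdx n b
  if lo < hi then pref.getD hi 0 - pref.getD lo 0 else 0

-- Source B's while-stack loop; the END of the Python list (append/pop side) is the HEAD of
-- the Lean list, so pushing (m+1,b) then (a,m) puts (a,m) on top.  Fuel counts loop
-- iterations = popped intervals; 2*(j-i)+1 covers the whole split tree when i ≤ j.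
def pvLoop (pref : List Int) (n : Nat) : Nat → List (Int × Int) → Bool
  | _, [] => true
  | 0, _ :: _ => true
  | fuel + 1, (a, b) :: rest =>
    if a == b then pvLoop pref n fuel rest
    else
      let m := PySem.Int.floordiv (a + b) 2
      if pvSeg pref n a (m + 1) < pvSeg pref n (m + 1) (b + 1) then false
      else pvLoop pref n fuel ((a, m) :: (m + 1, b) :: rest)

def izquierdaDominante_bruto_alt (i : Int) (j : Int) (arr : List Int) : Bool :=
  pvLoop (pvPrefAux 0 arr) arr.length (2 * (j - i).toNat + 1) [(i, j)]

-- ===== PRECONDITION & SPEC =====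
-- Pre_ excludes i > j, on which Python A recurses forever on an inverted range and
-- raises RecursionError (A returns on every i ≤ j; so does B).
def Pre_izquierdaDominante_bruto (i : Int) (j : Int) (_arr : List Int) : Prop := i ≤ j
instance (i : Int) (j : Int) (arr : List Int) : Decidable (Pre_izquierdaDominante_bruto i j arr) := by unfold Pre_izquierdaDominante_bruto; infer_instance

def pvWitness_izquierdaDominante_bruto : Int × Int × List Int := (0, 2, [3, 1, 2])

def Spec_izquierdaDominante_bruto (i : Int) (j : Int) (arr : List Int) (out : Bool) : Prop := out = izquierdaDominante_bruto_alt i j arr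
instance (i : Int) (j : Int) (arr : List Int) (out : Bool) : Decidable (Spec_izquierdaDominante_bruto i j arr out) := by unfold Spec_izquierdaDominante_bruto; infer_instance

-- ===== CLAIM (what is proved, stated in full; the proofs are below) =====
def Claim_equal_izquierdaDominante_bruto : Prop := ∀ (i : Int) (j : Int) (arr : List Int), Dom_izquierdaDominante_bruto i j arr → Pre_izquierdaDominante_bruto i j arr → Spec_izquierdaDominante_bruto i j arr (izquierdaDominante_bruto i j arr)

-- ===== LEMMAS AND PROOFS =====

-- the per-node check of the split tree, recursion on the interval width (proof-only)
def pvTreeOk (pref : List Int) (n : Nat) (a b : Int) : Bool :=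
  if a = b then true
  else if hab : a < b then
    if pvSeg pref n a (PySem.Int.floordiv (a + b) 2 + 1)
        < pvSeg pref n (PySem.Int.floordiv (a + b) 2 + 1) (b + 1) then false
    else pvTreeOk pref n a (PySem.Int.floordiv (a + b) 2)
        && pvTreeOk pref n (PySem.Int.floordiv (a + b) 2 + 1) b
  else true
termination_by (b - a).toNat
decreasing_by
  all_goals
    have h2 := PySem.Int.floordiv_eq_ediv_of_pos (a := a + b) (b := 2) (by omega)
    omega

-- number of loop iterations the interval (a,b) generates (its split-tree size)
def pvNodeCount (p : Int × Int) : Nat := 2 * (p.2 - p.1).toNat + 1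

lemma pvMid_bounds (a b : Int) (h : a < b) :
    a ≤ PySem.Int.floordiv (a + b) 2 ∧ PySem.Int.floordiv (a + b) 2 < b := by
  have h2 := PySem.Int.floordiv_eq_ediv_of_pos (a := a + b) (b := 2) (by omega)
  omega

lemma pvPrefAux_getD (s : Int) (xs : List Int) (k : Nat) (hk : k ≤ xs.length) :
    (pvPrefAux s xs).getD k 0 = s + (xs.take k).sum := by
  induction xs generalizing s k with
  | nil =>
    have : k = 0 := by simpa using hk
    simp [this, pvPrefAux]
  | cons x xs ih =>
    cases k with
    | zero => simp [pvPrefAux]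
    | succ k =>
      simp only [pvPrefAux, List.getD_cons_succ, List.take_succ_cons, List.sum_cons]
      rw [ih (s + x) k (by simpa using hk)]
      ring

lemma pvSeg_eq_slice_sum (arr : List Int) (a b : Int) :
    pvSeg (pvPrefAux 0 arr) arr.length a b
      = (PySem.List.slice arr (some a) (some b)).sum := by
  unfold pvSeg PySem.List.slice
  set lo := PySem.List.clampIdx arr.length a with hlo
  set hi := PySem.List.clampIdx arr.length b with hhi
  have hlen : lo ≤ arr.length := by rw [hlo]; exact PySem.List.clampIdx_le arr.length a
  have hlen' : hi ≤ arr.length := by rw [hhi]; exact PySem.List.clampIdx_le arr.length b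
  by_cases h : lo < hi
  · rw [if_pos h]
    rw [pvPrefAux_getD 0 arr hi hlen', pvPrefAux_getD 0 arr lo hlen]
    have htk : arr.take hi = arr.take lo ++ (arr.drop lo).take (hi - lo) := by
      rw [← List.take_add]
      congr 1
      omega
    rw [htk, List.sum_append]
    ring
  · rw [if_neg h]
    simp only [← hlo, ← hhi]
    have h0 : hi - lo = 0 := by omega
    rw [h0]
    simp

-- A's fueled recursion computes the per-node tree check (prefix-sum form of the sums)
lemma pvOkA_eq_treeOk (arr : List Int) (fuel : Nat) (a b : Int)
    (hab : a ≤ b) (hf : (b - a).toNat < fuel) :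
    pvOkA arr fuel a b = pvTreeOk (pvPrefAux 0 arr) arr.length a b := by
  induction fuel generalizing a b with
  | zero => omega
  | succ fuel ih =>
    by_cases he : a = b
    · simp [pvOkA, pvTreeOk, he]
    · have hlt : a < b := lt_of_le_of_ne hab he
      have hm := pvMid_bounds a b hlt
      rw [pvTreeOk]
      simp only [pvOkA, beq_iff_eq, if_neg he, dif_pos hlt, pvSeg_eq_slice_sum]
      rw [ih a (PySem.Int.floordiv (a + b) 2) (by omega) (by omega),
        ih (PySem.Int.floordiv (a + b) 2 + 1) b (by omega) (by omega)]

-- B's stack loop, given enough fuel, checks every interval on the stack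
lemma pvLoop_eq_all (arr : List Int) (fuel : Nat) (S : List (Int × Int))
    (hS : ∀ p ∈ S, p.1 ≤ p.2) (hf : (S.map pvNodeCount).sum ≤ fuel) :
    pvLoop (pvPrefAux 0 arr) arr.length fuel S
      = S.all (fun p => pvTreeOk (pvPrefAux 0 arr) arr.length p.1 p.2) := by
  induction fuel generalizing S with
  | zero =>
    cases S with
    | nil => rfl
    | cons p rest => simp [pvNodeCount] at hf
  | succ fuel ih =>
    cases S with
    | nil => rfl
    | cons p rest =>
      obtain ⟨a, b⟩ := p
      have hab : a ≤ b := hS (a, b) (by simp)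
      have hrest : ∀ q ∈ rest, q.1 ≤ q.2 := fun q hq => hS q (by simp [hq])
      by_cases he : a = b
      · have hcnt : (rest.map pvNodeCount).sum ≤ fuel := by
          simp only [List.map_cons, List.sum_cons, pvNodeCount] at hf ⊢
          omega
        have ht : pvTreeOk (pvPrefAux 0 arr) arr.length a b = true := by
          rw [pvTreeOk]; simp [he]
        simp only [pvLoop, beq_iff_eq, if_pos he, List.all_cons]
        rw [ih rest hrest hcnt, ht, Bool.true_and]
      · have hlt : a < b := lt_of_le_of_ne hab he
        have hm := pvMid_bounds a b hlt
        have hcnt : ((((a, PySem.Int.floordiv (a + b) 2) :: (PySem.Int.floordiv (a + b) 2 + 1, b) :: rest).map pvNodeCount).sum) ≤ fuel := by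
          simp only [List.map_cons, List.sum_cons, pvNodeCount] at hf ⊢
          omega
        have hok : ∀ q ∈ ((a, PySem.Int.floordiv (a + b) 2) :: (PySem.Int.floordiv (a + b) 2 + 1, b) :: rest), q.1 ≤ q.2 := by
          intro q hq
          simp only [List.mem_cons] at hq
          rcases hq with h | h | h
          · rw [h]; simp only; omega
          · rw [h]; simp only; omega
          · exact hrest q h
        simp only [pvLoop, beq_iff_eq, if_neg he, List.all_cons]
        rw [pvTreeOk]
        simp only [if_neg he, dif_pos hlt]
        rw [ih _ hok hcnt]
        simp only [List.all_cons]
        simp [Bool.and_assoc]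

-- ===== VERDICT (by name: the statement is the Claim_ definition above) =====
theorem izquierdaDominante_bruto_spec : Claim_equal_izquierdaDominante_bruto := by
  intro i j arr _ hpre
  unfold Spec_izquierdaDominante_bruto izquierdaDominante_bruto izquierdaDominante_bruto_alt
  have hij : i ≤ j := hpre
  rw [pvOkA_eq_treeOk arr _ i j hij (by omega)]
  rw [pvLoop_eq_all arr _ [(i, j)]
    (by intro p hp; simp only [List.mem_singleton] at hp; rw [hp]; exact hij)
    (by simp [pvNodeCount])]
  simp
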